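-- pv_equiv track=rewrite | github.com/Milarsh/EditorAssistant | src/assistant/tg_parser.py | _channel_from_url
-- ===== SOURCE A (Python) =====
-- from typing import Optional
--
-- def _channel_from_url(url: str) -> Optional[str]:
--     url = (url or "").strip()
--     for prefix in ("https://t.me/", "http://t.me/", "https://telegram.me/", "http://telegram.me/"):
--         if url.startswith(prefix):
--             tail = url[len(prefix):]
--             return tail.split("/", 1)[0]
--     if url.startswith("tg://resolve?domain="):
--         return url.split("=", 1)[1].split("&", 1)[0]
--     return None
-- ===== SOURCE B (Python) =====
-- from typing import Optional
--
--
-- def _upto(s: str, sep: str) -> str: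
--     out = []
--     for ch in s:
--         if ch == sep:
--             break
--         out.append(ch)
--     return "".join(out)
--
--
-- def _host_channel(rest: str) -> Optional[str]:
--     if rest.startswith("t.me/"):
--         return _upto(rest[5:], "/")
--     if rest.startswith("telegram.me/"):
--         return _upto(rest[12:], "/")
--     return None
--
--
-- def _channel_from_url(url: str) -> Optional[str]:
--     u = (url or "").strip()
--     if u.startswith("https://"):
--         return _host_channel(u[8:])
--     if u.startswith("http://"):
--         return _host_channel(u[7:])
--     if u.startswith("tg://resolve?domain="):
--         return _upto(u[20:], "&")
--     return None
-- ===== Notes on version B (the rewrite author's own statement) =====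
-- stated objective: alternative
-- what changed: Instead of probing four full scheme+host prefixes and calling str.split, B factors the URL once into scheme (https:// or http://) then host (t.me/ or telegram.me/), and extracts the channel by an explicit character scan up to the delimiter.
import Mathlib
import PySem

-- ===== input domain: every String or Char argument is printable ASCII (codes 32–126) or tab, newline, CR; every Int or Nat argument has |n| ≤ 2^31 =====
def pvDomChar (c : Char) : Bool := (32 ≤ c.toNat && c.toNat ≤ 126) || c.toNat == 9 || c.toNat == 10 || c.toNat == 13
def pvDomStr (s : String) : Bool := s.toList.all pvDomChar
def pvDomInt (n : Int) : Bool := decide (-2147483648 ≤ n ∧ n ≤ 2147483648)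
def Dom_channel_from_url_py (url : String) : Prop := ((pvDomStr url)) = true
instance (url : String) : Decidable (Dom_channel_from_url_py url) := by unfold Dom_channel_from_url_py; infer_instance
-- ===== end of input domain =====

-- B factors the URL once into scheme then host and scans characters up to the delimiter,
-- instead of A's four full-prefix probes with str.split; objective: alternative (same cost).

-- ===== PORT A =====
-- the for-loop over the four prefixes, as structural recursion over the prefix list;
-- str operations are PySem.Chars operations on .toList (exact on the ASCII domain)
def channelFromUrlAGo : List (List Char) → List Char → Option String
  | [], u =>
    -- after the loop: if url.startswith("tg://resolve?domain="): return url.split("=",1)[1].split("&",1)[0]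
    if PySem.Chars.startswith u "tg://resolve?domain=".toList then
      match PySem.List.pyGet? (PySem.Chars.splitOnMax u ['='] 1) 1 with
      | some t => some (String.mk (PySem.Chars.splitOnMax t ['&'] 1).headI)
      | none => none  -- unreachable: '=' occurs in the matched prefix, so split has a second piece
    else none
  | p :: ps, u =>
    if PySem.Chars.startswith u p then
      -- tail = url[len(prefix):]; return tail.split("/", 1)[0]
      some (String.mk (PySem.Chars.splitOnMax (u.drop p.length) ['/'] 1).headI)
    else channelFromUrlAGo ps u

def channel_from_url_py (url : String) : Option String :=
  -- url = (url or "").strip(); on a str argument '(url or "")' is url itself ("" stays "")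
  channelFromUrlAGo
    ["https://t.me/".toList, "http://t.me/".toList,
     "https://telegram.me/".toList, "http://telegram.me/".toList]
    (PySem.Str.strip url).toList

-- ===== PORT B =====
-- _upto: explicit character scan up to the separator
def pvUpto : List Char → Char → List Char
  | [], _ => []
  | c :: cs, sep => if c = sep then [] else c :: pvUpto cs sep

-- _host_channel
def pvHostChannel (rest : List Char) : Option String :=
  if PySem.Chars.startswith rest "t.me/".toList then
    some (String.mk (pvUpto (rest.drop 5) '/'))
  else if PySem.Chars.startswith rest "telegram.me/".toList then
    some (String.mk (pvUpto (rest.drop 12) '/'))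
  else none

def channel_from_url_py_alt (url : String) : Option String :=
  -- u = (url or "").strip(); u[k:] with k ≥ 0 is List.drop k
  let u := (PySem.Str.strip url).toList
  if PySem.Chars.startswith u "https://".toList then pvHostChannel (u.drop 8)
  else if PySem.Chars.startswith u "http://".toList then pvHostChannel (u.drop 7)
  else if PySem.Chars.startswith u "tg://resolve?domain=".toList then
    some (String.mk (pvUpto (u.drop 20) '&'))
  else none

-- ===== PRECONDITION & SPEC =====
def Spec_channel_from_url_py (url : String) (out : Option String) : Prop := out = channel_from_url_py_alt url
instance (url : String) (out : Option String) : Decidable (Spec_channel_from_url_py url out) := by unfold Spec_channel_from_url_py; infer_instance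

-- ===== CLAIM (what is proved, stated in full; the proofs are below) =====
def Claim_equal_channel_from_url_py : Prop := ∀ (url : String), Dom_channel_from_url_py url → Spec_channel_from_url_py url (channel_from_url_py url)

-- ===== LEMMAS AND PROOFS =====

lemma pvUpto_eq_takeWhile (cs : List Char) (sep : Char) :
    pvUpto cs sep = cs.takeWhile (fun x => x != sep) := by
  induction cs with
  | nil => rfl
  | cons c cs ih =>
    by_cases h : c = sep <;> simp [pvUpto, List.takeWhile_cons, h, ih]

lemma go_zero (sep : List Char) (fuel : Nat) (l cur : List Char) (acc : List (List Char)) :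
    PySem.Chars.splitOnMax.go sep fuel 0 l cur acc = ((cur.reverse ++ l) :: acc).reverse := by
  cases fuel with
  | zero => simp [PySem.Chars.splitOnMax.go]
  | succ f => cases l <;> simp [PySem.Chars.splitOnMax.go]

lemma go_one (c : Char) :
    ∀ (l : List Char) (fuel : Nat) (cur : List Char) (acc : List (List Char)), l.length < fuel →
      PySem.Chars.splitOnMax.go [c] fuel 1 l cur acc =
        acc.reverse ++ (cur.reverse ++ l.takeWhile (fun x => x != c)) ::
          (if c ∈ l then [l.drop ((l.takeWhile (fun x => x != c)).length + 1)] else []) := by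
  intro l
  induction l with
  | nil =>
    intro fuel cur acc h
    cases fuel with
    | zero => omega
    | succ f => simp [PySem.Chars.splitOnMax.go]
  | cons ch rest ih =>
    intro fuel cur acc h
    cases fuel with
    | zero => omega
    | succ f =>
      rw [PySem.Chars.splitOnMax.go]
      by_cases hc : ch = c
      · subst hc
        have hpre : [ch].isPrefixOf (ch :: rest) = true := by simp [List.isPrefixOf]
        simp only [hpre, if_neg (by omega : ¬ (1 : Nat) = 0)]
        rw [show List.drop [ch].length (ch :: rest) = rest from rfl]
        rw [go_zero]
        simp
      · have hpre : [c].isPrefixOf (ch :: rest) = false := by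
          simp [List.isPrefixOf, Ne.symm hc]
        simp only [hpre, if_neg (by omega : ¬ (1 : Nat) = 0), Bool.false_eq_true, if_false]
        rw [ih f (ch :: cur) acc (by simpa using Nat.lt_of_succ_lt_succ h)]
        simp [hc, Ne.symm hc]

lemma splitOnMax_one (c : Char) (cs : List Char) :
    PySem.Chars.splitOnMax cs [c] 1 =
      (cs.takeWhile (fun x => x != c)) ::
        (if c ∈ cs then [cs.drop ((cs.takeWhile (fun x => x != c)).length + 1)] else []) := by
  rw [PySem.Chars.splitOnMax, if_neg (by omega : ¬ (1 : Int) < 0)]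
  rw [show ((1 : Int)).toNat = 1 from rfl]
  rw [go_one c cs (cs.length + 1) [] [] (by omega)]
  simp

lemma headI_splitOnMax_one (c : Char) (cs : List Char) :
    (PySem.Chars.splitOnMax cs [c] 1).headI = cs.takeWhile (fun x => x != c) := by
  rw [splitOnMax_one]; rfl

lemma prefix_append_iff (a b s : List Char) :
    a ++ b <+: s ↔ a <+: s ∧ b <+: s.drop a.length := by
  constructor
  · rintro ⟨t, rfl⟩
    refine ⟨⟨b ++ t, by simp⟩, ⟨t, ?_⟩⟩
    simp
  · rintro ⟨⟨t1, h1⟩, ⟨t2, h2⟩⟩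
    refine ⟨t2, ?_⟩
    have hd : s.drop a.length = t1 := by subst h1; simp
    rw [hd] at h2
    subst h1; simp [← h2]

lemma prefix_excl {p q s : List Char} (hp : p <+: s) (hq : q <+: s)
    (h1 : ¬ p <+: q) (h2 : ¬ q <+: p) : False := by
  rcases List.prefix_or_prefix_of_prefix hp hq with h | h
  · exact h1 h
  · exact h2 h

lemma takeWhile_tg (v : List Char) :
    List.takeWhile (fun x => x != '=') ("tg://resolve?domain=".toList ++ v) =
      "tg://resolve?domain".toList := by
  rw [show "tg://resolve?domain=".toList ++ v = "tg://resolve?domain".toList ++ ('=' :: v) from rfl]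
  rw [List.takeWhile_append, if_pos (by decide)]
  simp

lemma drop_tg (v : List Char) :
    List.drop 20 ("tg://resolve?domain=".toList ++ v) = v := by
  rw [show (20 : Nat) = ("tg://resolve?domain=".toList).length from rfl]
  exact List.drop_left

-- the core equivalence, over an arbitrary (already stripped) character list
lemma core_eq (u : List Char) :
    channelFromUrlAGo
      ["https://t.me/".toList, "http://t.me/".toList,
       "https://telegram.me/".toList, "http://telegram.me/".toList] u =
    (if PySem.Chars.startswith u "https://".toList then pvHostChannel (u.drop 8)
     else if PySem.Chars.startswith u "http://".toList then pvHostChannel (u.drop 7)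
     else if PySem.Chars.startswith u "tg://resolve?domain=".toList then
       some (String.mk (pvUpto (u.drop 20) '&'))
     else none) := by
  have sw : ∀ p : List Char, p <+: u → PySem.Chars.startswith u p = true :=
    fun p h => (PySem.Chars.startswith_iff u p).mpr h
  have nsw : ∀ p : List Char, ¬ p <+: u → PySem.Chars.startswith u p = false :=
    fun p h => by
      rw [← Bool.not_eq_true, PySem.Chars.startswith_iff]; exact h
  by_cases hs : "https://".toList <+: u
  · -- B takes the https:// branch
    have hnP2 : ¬ "http://t.me/".toList <+: u :=
      fun h => prefix_excl hs h (by decide) (by decide)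
    have hnP4 : ¬ "http://telegram.me/".toList <+: u :=
      fun h => prefix_excl hs h (by decide) (by decide)
    have hnTG : ¬ "tg://resolve?domain=".toList <+: u :=
      fun h => prefix_excl hs h (by decide) (by decide)
    by_cases ht1 : "t.me/".toList <+: u.drop 8
    · have hP1 : "https://t.me/".toList <+: u := by
        rw [show "https://t.me/".toList = "https://".toList ++ "t.me/".toList from rfl,
          prefix_append_iff]
        exact ⟨hs, ht1⟩
      simp only [channelFromUrlAGo, sw _ hP1, if_true, sw _ hs, pvHostChannel]
      rw [show PySem.Chars.startswith (u.drop 8) "t.me/".toList = true from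
        (PySem.Chars.startswith_iff _ _).mpr ht1]
      simp [headI_splitOnMax_one, pvUpto_eq_takeWhile, List.drop_drop,
        show ("https://t.me/".toList).length = 13 from rfl]
    · by_cases ht2 : "telegram.me/".toList <+: u.drop 8
      · have hP3 : "https://telegram.me/".toList <+: u := by
          rw [show "https://telegram.me/".toList = "https://".toList ++ "telegram.me/".toList
            from rfl, prefix_append_iff]
          exact ⟨hs, ht2⟩
        have hnP1 : ¬ "https://t.me/".toList <+: u := by
          rw [show "https://t.me/".toList = "https://".toList ++ "t.me/".toList from rfl,
            prefix_append_iff]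
          exact fun h => ht1 h.2
        simp only [channelFromUrlAGo, nsw _ hnP1, nsw _ hnP2, sw _ hP3, sw _ hs, pvHostChannel,
          Bool.false_eq_true, if_false, if_true]
        rw [show PySem.Chars.startswith (u.drop 8) "t.me/".toList = false from
          by rw [← Bool.not_eq_true, PySem.Chars.startswith_iff]; exact ht1]
        rw [show PySem.Chars.startswith (u.drop 8) "telegram.me/".toList = true from
          (PySem.Chars.startswith_iff _ _).mpr ht2]
        simp [headI_splitOnMax_one, pvUpto_eq_takeWhile, List.drop_drop,
          show ("https://telegram.me/".toList).length = 20 from rfl]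
      · have hnP1 : ¬ "https://t.me/".toList <+: u := by
          rw [show "https://t.me/".toList = "https://".toList ++ "t.me/".toList from rfl,
            prefix_append_iff]
          exact fun h => ht1 h.2
        have hnP3 : ¬ "https://telegram.me/".toList <+: u := by
          rw [show "https://telegram.me/".toList = "https://".toList ++ "telegram.me/".toList
            from rfl, prefix_append_iff]
          exact fun h => ht2 h.2
        simp only [channelFromUrlAGo, nsw _ hnP1, nsw _ hnP2, nsw _ hnP3, nsw _ hnP4,
          nsw _ hnTG, sw _ hs, pvHostChannel, Bool.false_eq_true, if_false, if_true]
        rw [show PySem.Chars.startswith (u.drop 8) "t.me/".toList = false from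
          by rw [← Bool.not_eq_true, PySem.Chars.startswith_iff]; exact ht1]
        rw [show PySem.Chars.startswith (u.drop 8) "telegram.me/".toList = false from
          by rw [← Bool.not_eq_true, PySem.Chars.startswith_iff]; exact ht2]
        simp
  · have hnP1 : ¬ "https://t.me/".toList <+: u :=
      fun h => hs (List.IsPrefix.trans (by decide) h)
    have hnP3 : ¬ "https://telegram.me/".toList <+: u :=
      fun h => hs (List.IsPrefix.trans (by decide) h)
    by_cases hh : "http://".toList <+: u
    · -- B takes the http:// branch
      have hnTG : ¬ "tg://resolve?domain=".toList <+: u :=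
        fun h => prefix_excl hh h (by decide) (by decide)
      by_cases ht1 : "t.me/".toList <+: u.drop 7
      · have hP2 : "http://t.me/".toList <+: u := by
          rw [show "http://t.me/".toList = "http://".toList ++ "t.me/".toList from rfl,
            prefix_append_iff]
          exact ⟨hh, ht1⟩
        simp only [channelFromUrlAGo, nsw _ hnP1, sw _ hP2, nsw _ hs, sw _ hh, pvHostChannel,
          Bool.false_eq_true, if_false, if_true]
        rw [show PySem.Chars.startswith (u.drop 7) "t.me/".toList = true from
          (PySem.Chars.startswith_iff _ _).mpr ht1]
        simp [headI_splitOnMax_one, pvUpto_eq_takeWhile, List.drop_drop,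
          show ("http://t.me/".toList).length = 12 from rfl]
      · by_cases ht2 : "telegram.me/".toList <+: u.drop 7
        · have hP4 : "http://telegram.me/".toList <+: u := by
            rw [show "http://telegram.me/".toList = "http://".toList ++ "telegram.me/".toList
              from rfl, prefix_append_iff]
            exact ⟨hh, ht2⟩
          have hnP2 : ¬ "http://t.me/".toList <+: u := by
            rw [show "http://t.me/".toList = "http://".toList ++ "t.me/".toList from rfl,
              prefix_append_iff]
            exact fun h => ht1 h.2
          simp only [channelFromUrlAGo, nsw _ hnP1, nsw _ hnP2, nsw _ hnP3, sw _ hP4,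
            nsw _ hs, sw _ hh, pvHostChannel, Bool.false_eq_true, if_false, if_true]
          rw [show PySem.Chars.startswith (u.drop 7) "t.me/".toList = false from
            by rw [← Bool.not_eq_true, PySem.Chars.startswith_iff]; exact ht1]
          rw [show PySem.Chars.startswith (u.drop 7) "telegram.me/".toList = true from
            (PySem.Chars.startswith_iff _ _).mpr ht2]
          simp [headI_splitOnMax_one, pvUpto_eq_takeWhile, List.drop_drop,
            show ("http://telegram.me/".toList).length = 19 from rfl]
        · have hnP2 : ¬ "http://t.me/".toList <+: u := by
            rw [show "http://t.me/".toList = "http://".toList ++ "t.me/".toList from rfl,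
              prefix_append_iff]
            exact fun h => ht1 h.2
          have hnP4 : ¬ "http://telegram.me/".toList <+: u := by
            rw [show "http://telegram.me/".toList = "http://".toList ++ "telegram.me/".toList
              from rfl, prefix_append_iff]
            exact fun h => ht2 h.2
          simp only [channelFromUrlAGo, nsw _ hnP1, nsw _ hnP2, nsw _ hnP3, nsw _ hnP4,
            nsw _ hnTG, nsw _ hs, sw _ hh, pvHostChannel, Bool.false_eq_true, if_false, if_true]
          rw [show PySem.Chars.startswith (u.drop 7) "t.me/".toList = false from
            by rw [← Bool.not_eq_true, PySem.Chars.startswith_iff]; exact ht1]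
          rw [show PySem.Chars.startswith (u.drop 7) "telegram.me/".toList = false from
            by rw [← Bool.not_eq_true, PySem.Chars.startswith_iff]; exact ht2]
          simp
    · by_cases htg : "tg://resolve?domain=".toList <+: u
      · obtain ⟨v, hv⟩ := htg
        have hnP2 : ¬ "http://t.me/".toList <+: u :=
          fun h => hh (List.IsPrefix.trans (by decide) h)
        have hnP4 : ¬ "http://telegram.me/".toList <+: u :=
          fun h => hh (List.IsPrefix.trans (by decide) h)
        have hTG : "tg://resolve?domain=".toList <+: u := ⟨v, hv⟩
        simp only [channelFromUrlAGo, nsw _ hnP1, nsw _ hnP2, nsw _ hnP3, nsw _ hnP4,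
          sw _ hTG, nsw _ hs, nsw _ hh, Bool.false_eq_true, if_false, if_true]
        subst hv
        have hmem : '=' ∈ "tg://resolve?domain=".toList ++ v := by simp
        rw [splitOnMax_one '=' _, if_pos hmem, takeWhile_tg,
          show ("tg://resolve?domain".toList).length = 19 from rfl]
        rw [show (19 : Nat) + 1 = 20 from rfl, drop_tg]
        rw [show PySem.List.pyGet? ["tg://resolve?domain".toList, v] 1 = some v from
          by simp [PySem.List.pyGet?, PySem.List.pyIdx?]]
        simp only [headI_splitOnMax_one, pvUpto_eq_takeWhile, drop_tg]
      · have hnP2 : ¬ "http://t.me/".toList <+: u :=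
          fun h => hh (List.IsPrefix.trans (by decide) h)
        have hnP4 : ¬ "http://telegram.me/".toList <+: u :=
          fun h => hh (List.IsPrefix.trans (by decide) h)
        simp only [channelFromUrlAGo, nsw _ hnP1, nsw _ hnP2, nsw _ hnP3, nsw _ hnP4,
          nsw _ htg, nsw _ hs, nsw _ hh, Bool.false_eq_true, if_false]

-- ===== VERDICT (by name: the statement is the Claim_ definition above) =====
theorem channel_from_url_py_spec : Claim_equal_channel_from_url_py := by
  intro url _
  unfold Spec_channel_from_url_py channel_from_url_py channel_from_url_py_alt
  exact core_eq (PySem.Str.strip url).toList
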